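-- pv_equiv track=rewrite | github.com/pappakos0403/football_analysis | utils/closest_player_ids_utils.py | count_ball_possessions_per_player
-- ===== SOURCE A (Python) =====
-- from collections import defaultdict
--
-- def count_ball_possessions_per_player(closest_player_ids_filtered: dict) -> dict:
--
--     possession_counter = defaultdict(int)
--     previous_player_id = None
--
--     for frame_id in sorted(closest_player_ids_filtered.keys()):
--         player_id, _ = closest_player_ids_filtered[frame_id]
--
--         if player_id is None:
--             previous_player_id = None
--             continue
--
--         if player_id != previous_player_id:
--             possession_counter[player_id] += 1
--
--         previous_player_id = player_id
--
--     return dict(possession_counter)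
-- ===== SOURCE B (Python) =====
-- from collections import defaultdict
--
-- def count_ball_possessions_per_player(closest_player_ids_filtered: dict) -> dict:
--     # Phase 1: ordered list of player ids over the sorted frames.
--     ids = []
--     for frame_id in sorted(closest_player_ids_filtered.keys()):
--         player_id, _ = closest_player_ids_filtered[frame_id]
--         ids.append(player_id)
--     # Phase 2: collapse consecutive runs to their first element.
--     if ids:
--         runs = [ids[0]] + [b for a, b in zip(ids, ids[1:]) if b != a]
--     else:
--         runs = []
--     # Phase 3: count one possession per non-None run head.
--     counter = defaultdict(int)
--     for key in runs:
--         if key is not None: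
--             counter[key] += 1
--     return dict(counter)
-- ===== Notes on version B (the rewrite author's own statement) =====
-- stated objective: alternative
-- what changed: A's single stateful loop (counter + previous_player_id mutated together) is replaced by a three-phase pipeline: extract the player-id sequence over sorted frames, collapse consecutive runs with a zip-based comprehension, then count one possession per non-None run head.
import Mathlib
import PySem

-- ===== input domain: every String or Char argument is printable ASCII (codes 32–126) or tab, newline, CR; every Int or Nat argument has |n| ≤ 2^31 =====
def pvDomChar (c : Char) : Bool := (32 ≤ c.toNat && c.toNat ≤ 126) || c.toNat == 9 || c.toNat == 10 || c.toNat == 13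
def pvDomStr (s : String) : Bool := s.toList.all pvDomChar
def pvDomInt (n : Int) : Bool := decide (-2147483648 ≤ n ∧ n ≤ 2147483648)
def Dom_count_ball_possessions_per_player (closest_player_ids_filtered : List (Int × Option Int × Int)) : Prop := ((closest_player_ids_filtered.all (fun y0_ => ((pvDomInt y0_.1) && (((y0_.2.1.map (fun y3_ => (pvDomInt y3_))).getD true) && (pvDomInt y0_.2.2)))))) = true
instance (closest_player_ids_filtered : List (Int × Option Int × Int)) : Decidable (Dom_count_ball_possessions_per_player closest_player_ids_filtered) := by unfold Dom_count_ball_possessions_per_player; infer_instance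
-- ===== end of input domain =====

-- B splits A's single stateful loop into three phases (extract ids, collapse runs via zip, count run heads); objective: alternative decomposition, same cost.


-- ===== PORT A =====
-- A's loop body over one player id, state = (possession_counter, previous_player_id)
def cbpStepA (st : PySem.Dict Int Int × Option Int) (pid : Option Int) :
    PySem.Dict Int Int × Option Int :=
  match pid with
  | none => (st.1, none)                                  -- previous_player_id = None; continue
  | some p =>
      if some p ≠ st.2 then (st.1.modify p 0 (· + 1), some p)   -- possession_counter[p] += 1
      else (st.1, some p)

def count_ball_possessions_per_player (closest_player_ids_filtered : List (Int × Option Int × Int)) : List (Int × Int) :=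
  let d := PySem.Dict.ofList closest_player_ids_filtered
  let st := (PySem.List.sorted d.keys (fun x => x) false).foldl
      (fun st fid => cbpStepA st (d.getD fid (none, 0)).1)
      (PySem.Dict.empty, none)
  st.1.items

-- ===== PORT B =====
-- runs = [ids[0]] + [b for a, b in zip(ids, ids[1:]) if b != a]  (empty list for empty ids)
def cbpRuns (ids : List (Option Int)) : List (Option Int) :=
  match ids with
  | [] => []
  | x :: rest =>
      x :: (List.zip (x :: rest) rest).filterMap
        (fun ab => if ab.2 ≠ ab.1 then some ab.2 else none)

-- counting loop: counter[key] += 1 for each non-None run head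
def cbpCount (runs : List (Option Int)) (c : PySem.Dict Int Int) : PySem.Dict Int Int :=
  runs.foldl
    (fun c pid => match pid with
      | none => c
      | some p => c.modify p 0 (· + 1)) c

def count_ball_possessions_per_player_alt (closest_player_ids_filtered : List (Int × Option Int × Int)) : List (Int × Int) :=
  let d := PySem.Dict.ofList closest_player_ids_filtered
  let ids := (PySem.List.sorted d.keys (fun x => x) false).map
      (fun fid => (d.getD fid (none, 0)).1)
  (cbpCount (cbpRuns ids) PySem.Dict.empty).items

-- ===== PRECONDITION & SPEC =====
def Spec_count_ball_possessions_per_player (closest_player_ids_filtered : List (Int × Option Int × Int)) (out : List (Int × Int)) : Prop := out = count_ball_possessions_per_player_alt closest_player_ids_filtered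
instance (closest_player_ids_filtered : List (Int × Option Int × Int)) (out : List (Int × Int)) : Decidable (Spec_count_ball_possessions_per_player closest_player_ids_filtered out) := by unfold Spec_count_ball_possessions_per_player; infer_instance

-- ===== CLAIM (what is proved, stated in full; the proofs are below) =====
def Claim_equal_count_ball_possessions_per_player : Prop := ∀ (closest_player_ids_filtered : List (Int × Option Int × Int)), Dom_count_ball_possessions_per_player closest_player_ids_filtered → Spec_count_ball_possessions_per_player closest_player_ids_filtered (count_ball_possessions_per_player closest_player_ids_filtered)

-- ===== LEMMAS AND PROOFS =====

-- run heads of ids relative to a previous player id `prev`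
def cbpFrom (prev : Option Int) (ids : List (Option Int)) : List (Option Int) :=
  match ids with
  | [] => []
  | x :: xs => if x = prev then cbpFrom x xs else x :: cbpFrom x xs

theorem cbpCount_none (t : List (Option Int)) (c : PySem.Dict Int Int) :
    cbpCount (none :: t) c = cbpCount t c := by
  simp [cbpCount, List.foldl]

theorem cbpCount_some (p : Int) (t : List (Option Int)) (c : PySem.Dict Int Int) :
    cbpCount (some p :: t) c = cbpCount t (c.modify p 0 (· + 1)) := by
  simp [cbpCount, List.foldl]

-- A's fold equals counting the run heads relative to the current previous id
theorem foldA_eq_cbpCount (ids : List (Option Int)) (c : PySem.Dict Int Int) (prev : Option Int) :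
    (ids.foldl cbpStepA (c, prev)).1 = cbpCount (cbpFrom prev ids) c := by
  induction ids generalizing c prev with
  | nil => rfl
  | cons x xs ih =>
    cases x with
    | none =>
      by_cases h : (none : Option Int) = prev
      · simp [List.foldl, cbpStepA, cbpFrom, h, ih]
      · simp [List.foldl, cbpStepA, cbpFrom, h, ih, cbpCount_none]
    | some p =>
      by_cases h : some p = prev
      · simp [List.foldl, cbpStepA, cbpFrom, h, ih]
      · simp [List.foldl, cbpStepA, cbpFrom, h, ih, cbpCount_some]

-- B's zip comprehension computes the run heads after a given first element
theorem zip_filterMap_eq_cbpFrom (xs : List (Option Int)) (x : Option Int) :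
    (List.zip (x :: xs) xs).filterMap
        (fun ab => if ab.2 ≠ ab.1 then some ab.2 else none) = cbpFrom x xs := by
  induction xs generalizing x with
  | nil => rfl
  | cons y ys ih =>
    rw [List.zip_cons_cons, List.filterMap_cons, ih]
    by_cases h : y = x
    · simp [cbpFrom, h]
    · simp [cbpFrom, h]

theorem cbpCount_runs_eq (ids : List (Option Int)) (c : PySem.Dict Int Int) :
    cbpCount (cbpRuns ids) c = cbpCount (cbpFrom none ids) c := by
  cases ids with
  | nil => rfl
  | cons x xs =>
    show cbpCount (x :: (List.zip (x :: xs) xs).filterMap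
        (fun ab => if ab.2 ≠ ab.1 then some ab.2 else none)) c = _
    rw [zip_filterMap_eq_cbpFrom]
    cases x with
    | none => simp [cbpFrom, cbpCount_none]
    | some p => simp [cbpFrom]

-- A's fold over the sorted keys, with the lookup fused in, counts the run heads of the id list
theorem foldA_keys (ks : List Int) (f : Int → Option Int) (c : PySem.Dict Int Int)
    (prev : Option Int) :
    (ks.foldl (fun st k => cbpStepA st (f k)) (c, prev)).1
      = cbpCount (cbpFrom prev (ks.map f)) c := by
  have h := foldA_eq_cbpCount (ks.map f) c prev
  rw [List.foldl_map] at h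
  exact h

-- ===== VERDICT (by name: the statement is the Claim_ definition above) =====
theorem count_ball_possessions_per_player_spec : Claim_equal_count_ball_possessions_per_player := by
  intro l _
  unfold Spec_count_ball_possessions_per_player
  show (_ : PySem.Dict Int Int × Option Int).1.items = _
  rw [foldA_keys (PySem.List.sorted (PySem.Dict.ofList l).keys (fun x => x) false)
        (fun fid => ((PySem.Dict.ofList l).getD fid (none, 0)).1),
      ← cbpCount_runs_eq]
  rfl
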